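-- pv_equiv track=rewrite | github.com/safiyesarac/Selecting-candidate-parents-for-Bayesian-learning-of-DAGs | experiments/test.py | most_likely_parents
-- ===== SOURCE A (Python) =====
-- from collections import Counter, defaultdict
-- import itertools
--
-- def most_likely_parents(sampled_dags, K):
--     """
--     Parameters
--     ----------
--     sampled_dags : list[dict[int, set[int]]]
--         Each element is a DAG represented as {child : set(parents)}.
--     K : int
--         Exact number of parents to return for every node.
--
--     Returns
--     -------
--     dict[int, tuple[int]]
--         node → K parents chosen by
--         (i) larger edge‑frequency,
--         (ii) larger joint‑frequency with already‑chosen parents,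
--         (iii) smaller parent index.
--     """
--     # ------------------------------------------------------------------
--     # 0)  gather the full node set
--     # ------------------------------------------------------------------
--     all_nodes = set()
--     for dag in sampled_dags:
--         all_nodes.update(dag.keys())
--         for ps in dag.values():
--             all_nodes.update(ps)
--     all_nodes = sorted(all_nodes)           # deterministic order
--
--     # ------------------------------------------------------------------
--     # 1)  single‑edge frequencies  p(child←parent)
--     # ------------------------------------------------------------------
--     edge_freq = defaultdict(Counter)        # child → Counter(parent → hits)
--     for dag in sampled_dags:
--         for child, parents in dag.items():
--             for p in parents:
--                 edge_freq[child][p] += 1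
--
--     # ------------------------------------------------------------------
--     # 2)  joint frequencies  p(child←{p,q})   (needed only for ties)
--     # ------------------------------------------------------------------
--     joint_freq = defaultdict(lambda: defaultdict(int))
--     for dag in sampled_dags:
--         for child, parents in dag.items():
--             for p, q in itertools.combinations(parents, 2):
--                 joint_freq[child][frozenset((p, q))] += 1
--
--     # ------------------------------------------------------------------
--     # 3)  select K parents per child
--     # ------------------------------------------------------------------
--     result = {}
--     for child in all_nodes:
--         # ensure we have an entry even if the child never had parents
--         c_freq = edge_freq[child]
--
--         # give 0 frequency to never‑seen edges so we can still rank them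
--         for p in all_nodes:
--             if p != child and p not in c_freq:
--                 c_freq[p] = 0
--
--         # greedy tie‑aware selection
--         chosen = []
--         while len(chosen) < K:
--             def sort_key(p):
--                 # primary: larger edge frequency
--                 primary = c_freq[p]
--                 # secondary: larger joint freq with already‑chosen parents
--                 secondary = sum(
--                     joint_freq[child][frozenset((p, q))]
--                     for q in chosen
--                 )
--                 # tertiary: smaller index (negate so that max() picks smallest)
--                 tertiary = -p
--                 return (primary, secondary, tertiary)
--
--             # among not‑yet‑chosen parents, take the argmax of the key
--             candidate = max(
--                 (p for p in all_nodes if p != child and p not in chosen),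
--                 key=sort_key
--             )
--             chosen.append(candidate)
--
--         result[child] = tuple(chosen)
--
--     return result
-- ===== SOURCE B (Python) =====
-- from collections import Counter, defaultdict
-- import itertools
--
-- def most_likely_parents(sampled_dags, K):
--     # flat Counters over (child, parent) / (child, pair) events; the greedy selection
--     # keeps a shrinking candidate list and incrementally maintained secondary scores
--     nodes = {c for dag in sampled_dags for c in dag} | \
--             {p for dag in sampled_dags for ps in dag.values() for p in ps}
--     nodes = sorted(nodes)
--     edge = Counter((child, p)
--                    for dag in sampled_dags for child, ps in dag.items() for p in ps)
--     joint = Counter((child, frozenset(pq))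
--                     for dag in sampled_dags for child, ps in dag.items()
--                     for pq in itertools.combinations(ps, 2))
--     result = {}
--     for child in nodes:
--         remaining = [p for p in nodes if p != child]
--         sec = defaultdict(int)
--         chosen = []
--         for _ in range(K):
--             best = max(remaining, key=lambda p: (edge[(child, p)], sec[p], -p))
--             remaining.remove(best)
--             chosen.append(best)
--             for p in remaining:
--                 sec[p] += joint[(child, frozenset((p, best)))]
--         result[child] = tuple(chosen)
--     return result
-- ===== Notes on version B (the rewrite author's own statement) =====
-- stated objective: alternative
-- what changed: B builds flat Counters keyed by (child, parent) / (child, pair) instead of nested defaultdicts and, in the greedy per-node selection, keeps a shrinking candidate list and incrementally updates each candidate's joint-frequency tie-break score after every pick instead of re-summing over the chosen set inside the sort key.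
import Mathlib
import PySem

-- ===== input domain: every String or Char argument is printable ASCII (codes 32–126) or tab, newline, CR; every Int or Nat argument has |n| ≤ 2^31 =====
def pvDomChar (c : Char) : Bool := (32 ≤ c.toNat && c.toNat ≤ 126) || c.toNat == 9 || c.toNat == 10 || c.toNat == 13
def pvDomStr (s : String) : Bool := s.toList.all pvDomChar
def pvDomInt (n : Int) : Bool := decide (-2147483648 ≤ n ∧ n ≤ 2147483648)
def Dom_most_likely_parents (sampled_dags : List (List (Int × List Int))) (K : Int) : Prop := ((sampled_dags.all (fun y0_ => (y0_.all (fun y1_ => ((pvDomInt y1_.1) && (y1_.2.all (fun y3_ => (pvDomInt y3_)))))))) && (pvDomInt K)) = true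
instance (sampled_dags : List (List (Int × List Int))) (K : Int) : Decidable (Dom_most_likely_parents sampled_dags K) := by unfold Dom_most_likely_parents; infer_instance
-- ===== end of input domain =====

-- B replaces A's nested defaultdict counters by flat Counters keyed by (child, parent) /
-- (child, pair) and, in the greedy selection, replaces the per-iteration re-summation over
-- `chosen` by a shrinking candidate list with incrementally maintained secondary scores
-- (objective: alternative); equivalence is proved on Pre_ (A raises ValueError outside it).

-- frozenset((p, q)) of two ints, as its canonical (min, max) pair (used by both ports)
def pvPairKey (p q : Int) : Int × Int := (min p q, max p q)
-- Python '>' on int triples (lexicographic), as used by max(..., key=...) in both ports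
def pvKeyGt (a b : Int × Int × Int) : Bool :=
  decide (b.1 < a.1 ∨ (a.1 = b.1 ∧ (b.2.1 < a.2.1 ∨ (a.2.1 = b.2.1 ∧ b.2.2 < a.2.2))))

-- ===== PORT A =====
-- step 0: all_nodes as a Python set (update with keys, then with every parent set)
def pvA_gather (sampled_dags : List (List (Int × List Int))) : PySem.Set Int :=
  sampled_dags.foldl (fun s dag =>
    let d := PySem.Dict.ofList dag
    (d.values.foldl (fun s ps => PySem.Set.update s ps) (PySem.Set.update s d.keys)))
    PySem.Set.empty

-- step 1: edge_freq : defaultdict(Counter)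
def pvA_edge (sampled_dags : List (List (Int × List Int))) : PySem.Dict Int (PySem.Dict Int Int) :=
  sampled_dags.foldl (fun ef dag =>
    (PySem.Dict.ofList dag).items.foldl (fun ef cp =>
      (PySem.Set.ofList cp.2).foldl (fun ef p =>
        ef.modify cp.1 PySem.Dict.empty (fun c => c.modify p 0 (· + 1))) ef) ef)
    PySem.Dict.empty

-- step 2: joint_freq : defaultdict(defaultdict(int)), keyed by frozenset pairs
def pvA_joint (sampled_dags : List (List (Int × List Int))) : PySem.Dict Int (PySem.Dict (Int × Int) Int) :=
  sampled_dags.foldl (fun jf dag =>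
    (PySem.Dict.ofList dag).items.foldl (fun jf cp =>
      (PySem.List.combinations (PySem.Set.ofList cp.2) 2).foldl (fun jf pq =>
        match pq with
        | [p, q] => jf.modify cp.1 PySem.Dict.empty (fun m => m.modify (pvPairKey p q) 0 (· + 1))
        | _ => jf) jf) jf)
    PySem.Dict.empty

-- the per-candidate sort_key (primary, secondary, tertiary)
def pvA_key (cfreq : PySem.Dict Int Int) (jchild : PySem.Dict (Int × Int) Int)
    (chosen : List Int) (p : Int) : Int × Int × Int :=
  (cfreq.getD p 0, (chosen.map (fun q => jchild.getD (pvPairKey p q) 0)).sum, -p)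

-- 'for p in all_nodes: if p != child and p not in c_freq: c_freq[p] = 0'
def pvA_zfill (allNodes : List Int) (child : Int) (c : PySem.Dict Int Int) : PySem.Dict Int Int :=
  allNodes.foldl (fun c p => if p ≠ child ∧ c.contains p = false then c.insert p 0 else c) c

-- 'while len(chosen) < K: candidate = max(..., key=sort_key); chosen.append(candidate)'
-- (when the candidate generator is empty Python raises ValueError: outside Pre_)
def pvA_select (allNodes : List Int) (cfreq : PySem.Dict Int Int)
    (jchild : PySem.Dict (Int × Int) Int) (child : Int) :
    Nat → List Int → List Int
  | 0, chosen => chosen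
  | n + 1, chosen =>
    match allNodes.filter (fun p => decide (p ≠ child ∧ p ∉ chosen)) with
    | [] => chosen
    | h :: t =>
      let cand := t.foldl (fun best x =>
        if pvKeyGt (pvA_key cfreq jchild chosen x) (pvA_key cfreq jchild chosen best)
        then x else best) h
      pvA_select allNodes cfreq jchild child n (chosen ++ [cand])

def most_likely_parents (sampled_dags : List (List (Int × List Int))) (K : Int) :
    List (Int × List Int) :=
  let allNodes := PySem.List.sorted (pvA_gather sampled_dags) (fun x => x)
  let ef := pvA_edge sampled_dags
  let jf := pvA_joint sampled_dags
  allNodes.foldl (fun res child =>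
    let cfreq := pvA_zfill allNodes child (ef.getD child PySem.Dict.empty)
    let chosen := pvA_select allNodes cfreq (jf.getD child PySem.Dict.empty) child K.toNat []
    res ++ [(child, chosen)]) []

-- ===== PORT B =====
-- nodes = sorted({c for dag ...} | {p for dag ... for ps ... for p in ps})
def pvB_nodes (sampled_dags : List (List (Int × List Int))) : List Int :=
  PySem.List.sorted
    (PySem.Set.union
      (PySem.Set.ofList (sampled_dags.flatMap (fun dag => (PySem.Dict.ofList dag).keys)))
      (sampled_dags.flatMap (fun dag =>
        (PySem.Dict.ofList dag).values.flatMap (fun ps => PySem.Set.ofList ps))))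
    (fun x => x)

-- edge = Counter((child, p) for ...)
def pvB_edgeEvents (sampled_dags : List (List (Int × List Int))) : List (Int × Int) :=
  sampled_dags.flatMap (fun dag =>
    (PySem.Dict.ofList dag).items.flatMap (fun cp =>
      (PySem.Set.ofList cp.2).map (fun p => (cp.1, p))))

-- joint = Counter((child, frozenset(pq)) for ... for pq in combinations(ps, 2))
def pvB_jointEvents (sampled_dags : List (List (Int × List Int))) : List (Int × (Int × Int)) :=
  sampled_dags.flatMap (fun dag =>
    (PySem.Dict.ofList dag).items.flatMap (fun cp =>
      (PySem.List.combinations (PySem.Set.ofList cp.2) 2).filterMap (fun pq =>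
        match pq with
        | [p, q] => some (cp.1, pvPairKey p q)
        | _ => none)))

def pvB_key (edge : PySem.Dict (Int × Int) Int) (sec : PySem.Dict Int Int)
    (child p : Int) : Int × Int × Int :=
  (edge.getD (child, p) 0, sec.getD p 0, -p)

-- 'for _ in range(K): best = max(remaining, key=...); remaining.remove(best);
--  chosen.append(best); for p in remaining: sec[p] += joint[...]'
def pvB_select (edge : PySem.Dict (Int × Int) Int) (joint : PySem.Dict (Int × (Int × Int)) Int)
    (child : Int) : Nat → List Int → PySem.Dict Int Int → List Int → List Int
  | 0, _, _, chosen => chosen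
  | n + 1, remaining, sec, chosen =>
    match remaining with
    | [] => chosen
    | h :: t =>
      let best := t.foldl (fun b x =>
        if pvKeyGt (pvB_key edge sec child x) (pvB_key edge sec child b) then x else b) h
      let remaining' := (PySem.List.remove? remaining best).getD remaining
      let sec' := remaining'.foldl
        (fun s p => s.modify p 0 (· + joint.getD (child, pvPairKey p best) 0)) sec
      pvB_select edge joint child n remaining' sec' (chosen ++ [best])

def most_likely_parents_alt (sampled_dags : List (List (Int × List Int))) (K : Int) :
    List (Int × List Int) :=
  let nodes := pvB_nodes sampled_dags
  let edge := PySem.Dict.counter (pvB_edgeEvents sampled_dags)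
  let joint := PySem.Dict.counter (pvB_jointEvents sampled_dags)
  nodes.foldl (fun res child =>
    res ++ [(child,
      pvB_select edge joint child K.toNat
        (nodes.filter (fun p => decide (p ≠ child))) PySem.Dict.empty [])]) []

-- ===== PRECONDITION & SPEC =====
-- the distinct nodes mentioned anywhere in the input (keys and parents)
def pvNodesOf (sampled_dags : List (List (Int × List Int))) : List Int :=
  PySem.Set.ofList (sampled_dags.flatMap (fun dag => dag.map Prod.fst ++ dag.flatMap Prod.snd))

-- Pre_ excludes exactly the inputs where A raises ValueError ('max() arg is an empty
-- sequence'): some node exists and K exceeds the number of available candidates.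
def Pre_most_likely_parents (sampled_dags : List (List (Int × List Int))) (K : Int) : Prop :=
  pvNodesOf sampled_dags = [] ∨ K < ((pvNodesOf sampled_dags).length : Int)

instance (sampled_dags : List (List (Int × List Int))) (K : Int) :
    Decidable (Pre_most_likely_parents sampled_dags K) := by
  unfold Pre_most_likely_parents; infer_instance

def pvWitness_most_likely_parents : (List (List (Int × List Int))) × Int :=
  ([[(0, [1]), (1, [])]], 1)

def Spec_most_likely_parents (sampled_dags : List (List (Int × List Int))) (K : Int)
    (out : List (Int × List Int)) : Prop := out = most_likely_parents_alt sampled_dags K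
instance (sampled_dags : List (List (Int × List Int))) (K : Int) (out : List (Int × List Int)) :
    Decidable (Spec_most_likely_parents sampled_dags K out) := by
  unfold Spec_most_likely_parents; infer_instance

-- ===== CLAIM (what is proved, stated in full; the proofs are below) =====
def Claim_equal_most_likely_parents : Prop :=
  ∀ (sampled_dags : List (List (Int × List Int))) (K : Int),
    Dom_most_likely_parents sampled_dags K → Pre_most_likely_parents sampled_dags K →
    Spec_most_likely_parents sampled_dags K (most_likely_parents sampled_dags K)

-- ===== LEMMAS AND PROOFS =====

-- ---- nodes ----
theorem pv_mem_values_fold (vs : List (List Int)) (s : PySem.Set Int) (x : Int) :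
    x ∈ vs.foldl (fun s ps => PySem.Set.update s ps) s ↔ x ∈ s ∨ ∃ ps ∈ vs, x ∈ ps := by
  induction vs generalizing s with
  | nil => simp
  | cons v vs ih => simp [ih, PySem.Set.mem_update]; tauto

theorem pv_nodup_values_fold (vs : List (List Int)) (s : PySem.Set Int) (h : s.Nodup) :
    (vs.foldl (fun s ps => PySem.Set.update s ps) s).Nodup := by
  induction vs generalizing s with
  | nil => exact h
  | cons v vs ih => exact ih _ (PySem.Set.nodup_update _ _ h)

theorem pv_gather_fold_mem (dags : List (List (Int × List Int))) (s : PySem.Set Int) (x : Int) :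
    x ∈ dags.foldl (fun s dag =>
        let d := PySem.Dict.ofList dag
        (d.values.foldl (fun s ps => PySem.Set.update s ps) (PySem.Set.update s d.keys))) s ↔
      x ∈ s ∨ ∃ dag ∈ dags, x ∈ (PySem.Dict.ofList dag).keys ∨
        ∃ ps ∈ (PySem.Dict.ofList dag).values, x ∈ ps := by
  induction dags generalizing s with
  | nil => simp
  | cons dag dags ih =>
    simp only [List.foldl_cons, ih, pv_mem_values_fold, PySem.Set.mem_update, List.mem_cons]
    constructor
    · rintro (((h | h) | h) | ⟨d, hd, h⟩)
      · exact Or.inl h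
      · exact Or.inr ⟨dag, Or.inl rfl, Or.inl h⟩
      · exact Or.inr ⟨dag, Or.inl rfl, Or.inr h⟩
      · exact Or.inr ⟨d, Or.inr hd, h⟩
    · rintro (h | ⟨d, (rfl | hd), h⟩)
      · exact Or.inl (Or.inl (Or.inl h))
      · rcases h with h | h
        · exact Or.inl (Or.inl (Or.inr h))
        · exact Or.inl (Or.inr h)
      · exact Or.inr ⟨d, hd, h⟩

theorem pv_mem_gather (sampled_dags : List (List (Int × List Int))) (x : Int) :
    x ∈ pvA_gather sampled_dags ↔
      ∃ dag ∈ sampled_dags, x ∈ (PySem.Dict.ofList dag).keys ∨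
        ∃ ps ∈ (PySem.Dict.ofList dag).values, x ∈ ps := by
  unfold pvA_gather
  rw [pv_gather_fold_mem]
  simp [PySem.Set.empty]

theorem pv_gather_fold_nodup (dags : List (List (Int × List Int))) (s : PySem.Set Int)
    (hs : s.Nodup) :
    (dags.foldl (fun s dag =>
        let d := PySem.Dict.ofList dag
        (d.values.foldl (fun s ps => PySem.Set.update s ps) (PySem.Set.update s d.keys))) s).Nodup := by
  induction dags generalizing s with
  | nil => exact hs
  | cons dag dags ih =>
    exact ih _ (pv_nodup_values_fold _ _ (PySem.Set.nodup_update _ _ hs))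

theorem pv_nodup_gather (sampled_dags : List (List (Int × List Int))) :
    (pvA_gather sampled_dags).Nodup := by
  unfold pvA_gather
  exact pv_gather_fold_nodup _ _ (by simp [PySem.Set.empty])

theorem pv_nodes_eq (sampled_dags : List (List (Int × List Int))) :
    PySem.List.sorted (pvA_gather sampled_dags) (fun x => x) = pvB_nodes sampled_dags := by
  unfold pvB_nodes
  apply PySem.List.sorted_eq_sorted_of_perm _ _ _ (fun a b h => h)
  rw [List.perm_ext_iff_of_nodup (pv_nodup_gather _)
    (PySem.Set.nodup_union _ _ (PySem.Set.nodup_ofList _))]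
  intro a
  rw [pv_mem_gather, PySem.Set.mem_union, PySem.Set.mem_ofList]
  simp only [List.mem_flatMap, PySem.Set.mem_ofList]
  constructor
  · rintro ⟨dag, hdag, h | ⟨ps, hps, h⟩⟩
    · exact Or.inl ⟨dag, hdag, h⟩
    · exact Or.inr ⟨dag, hdag, ps, hps, h⟩
  · rintro (⟨dag, hdag, h⟩ | ⟨dag, hdag, ps, hps, h⟩)
    · exact ⟨dag, hdag, Or.inl h⟩
    · exact ⟨dag, hdag, Or.inr ⟨ps, hps, h⟩⟩

-- ---- counters ----
theorem pv_nested_count {κ₁ κ₂ : Type} [BEq κ₁] [LawfulBEq κ₁] [BEq κ₂] [LawfulBEq κ₂]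
    (E : List (κ₁ × κ₂)) (d : PySem.Dict κ₁ (PySem.Dict κ₂ Int)) (c : κ₁) (p : κ₂) :
    ((E.foldl (fun ef e => ef.modify e.1 PySem.Dict.empty
        (fun m => m.modify e.2 0 (· + 1))) d).getD c PySem.Dict.empty).getD p 0
      = (d.getD c PySem.Dict.empty).getD p 0 + (E.count (c, p) : Int) := by
  induction E generalizing d with
  | nil => simp
  | cons e E ih =>
    rw [List.foldl_cons, ih, List.count_cons]
    by_cases hc : c = e.1
    · subst hc
      rw [PySem.Dict.getD_modify_self]
      by_cases hp : p = e.2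
      · subst hp
        rw [PySem.Dict.getD_modify_self]
        have : e = (e.1, e.2) := rfl
        simp [← this]
        ring
      · rw [PySem.Dict.getD_modify_of_ne _ _ _ hp]
        have : ¬ e = (e.1, p) := by
          intro h
          exact hp (congrArg Prod.snd h).symm
        simp [this]
    · rw [PySem.Dict.getD_modify_of_ne _ _ _ hc]
      have : ¬ e = (c, p) := by
        intro h
        exact hc (congrArg Prod.fst h).symm
      simp [this]

theorem pv_edge_eq (sampled_dags : List (List (Int × List Int))) (c p : Int) :
    ((pvA_edge sampled_dags).getD c PySem.Dict.empty).getD p 0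
      = (PySem.Dict.counter (pvB_edgeEvents sampled_dags)).getD (c, p) 0 := by
  have h : pvA_edge sampled_dags = (pvB_edgeEvents sampled_dags).foldl
      (fun ef e => ef.modify e.1 PySem.Dict.empty (fun m => m.modify e.2 0 (· + 1)))
      PySem.Dict.empty := by
    unfold pvA_edge pvB_edgeEvents
    simp only [List.foldl_flatMap, List.foldl_map]
  rw [h, PySem.Dict.getD_counter, pv_nested_count]
  simp

theorem pv_joint_eq (sampled_dags : List (List (Int × List Int))) (c : Int) (k : Int × Int) :
    ((pvA_joint sampled_dags).getD c PySem.Dict.empty).getD k 0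
      = (PySem.Dict.counter (pvB_jointEvents sampled_dags)).getD (c, k) 0 := by
  have h : pvA_joint sampled_dags = (pvB_jointEvents sampled_dags).foldl
      (fun jf e => jf.modify e.1 PySem.Dict.empty (fun m => m.modify e.2 0 (· + 1)))
      PySem.Dict.empty := by
    unfold pvA_joint pvB_jointEvents
    simp only [List.foldl_flatMap, List.foldl_filterMap]
    apply PySem.List.foldl_congr_mem'
    intro dag _ acc
    apply PySem.List.foldl_congr_mem'
    intro cp _ acc
    apply PySem.List.foldl_congr_mem'
    intro pq _ acc
    rcases pq with _ | ⟨p, _ | ⟨q, _ | _⟩⟩ <;> rfl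
  rw [h, PySem.Dict.getD_counter, pv_nested_count]
  simp

theorem pv_zfill_getD (allNodes : List Int) (child : Int) (c : PySem.Dict Int Int) (q : Int) :
    (pvA_zfill allNodes child c).getD q 0 = c.getD q 0 := by
  unfold pvA_zfill
  induction allNodes generalizing c with
  | nil => rfl
  | cons p ps ih =>
    rw [List.foldl_cons, ih]
    split_ifs with h
    · by_cases hq : q = p
      · subst hq
        rw [PySem.Dict.getD_insert_self, PySem.Dict.getD_of_not_contains _ _ h.2]
      · rw [PySem.Dict.getD_insert_of_ne _ _ _ hq]
    · rfl

-- ---- selection ----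
theorem pv_sec_fold_getD (l : List Int) (hl : l.Nodup) (v : Int → Int)
    (s : PySem.Dict Int Int) (p : Int) :
    (l.foldl (fun s q => s.modify q 0 (· + v q)) s).getD p 0
      = s.getD p 0 + (if p ∈ l then v p else 0) := by
  induction l generalizing s with
  | nil => simp
  | cons q l ih =>
    rw [List.foldl_cons, ih (List.Nodup.of_cons hl)]
    by_cases hp : p = q
    · subst hp
      have : p ∉ l := (List.nodup_cons.mp hl).1
      rw [PySem.Dict.getD_modify_self]
      simp [this]
    · rw [PySem.Dict.getD_modify_of_ne _ _ _ hp]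
      simp [hp]

theorem pv_pick_mem (k : Int → Int × Int × Int) (t : List Int) (h0 : Int) :
    t.foldl (fun b x => if pvKeyGt (k x) (k b) then x else b) h0 = h0 ∨
    t.foldl (fun b x => if pvKeyGt (k x) (k b) then x else b) h0 ∈ t := by
  induction t generalizing h0 with
  | nil => exact Or.inl rfl
  | cons x t ih =>
    rw [List.foldl_cons]
    rcases ih (if pvKeyGt (k x) (k h0) then x else h0) with h | h
    · rw [h]
      split_ifs with hc
      · exact Or.inr (List.mem_cons_self)
      · exact Or.inl rfl
    · exact Or.inr (List.mem_cons_of_mem _ h)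

theorem pv_pick_congr (kA kB : Int → Int × Int × Int) (S : List Int) (t : List Int) (h0 : Int)
    (hh : h0 ∈ S) (ht : ∀ x ∈ t, x ∈ S) (hk : ∀ x ∈ S, kA x = kB x) :
    t.foldl (fun b x => if pvKeyGt (kA x) (kA b) then x else b) h0
      = t.foldl (fun b x => if pvKeyGt (kB x) (kB b) then x else b) h0 := by
  induction t generalizing h0 with
  | nil => rfl
  | cons x t ih =>
    simp only [List.foldl_cons]
    rw [hk x (ht x List.mem_cons_self), hk h0 hh]
    apply ih
    · split_ifs
      · exact ht x List.mem_cons_self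
      · exact hh
    · exact fun y hy => ht y (List.mem_cons_of_mem _ hy)

theorem pv_select_eq (nodes : List Int) (hnd : nodes.Nodup)
    (cfreq : PySem.Dict Int Int) (jA : PySem.Dict (Int × Int) Int)
    (edge : PySem.Dict (Int × Int) Int) (joint : PySem.Dict (Int × (Int × Int)) Int)
    (child : Int)
    (hedge : ∀ p, cfreq.getD p 0 = edge.getD (child, p) 0)
    (hjoint : ∀ k, jA.getD k 0 = joint.getD (child, k) 0)
    (n : Nat) (chosen : List Int) (sec : PySem.Dict Int Int) (rem : List Int)
    (hrem : rem = nodes.filter (fun p => decide (p ≠ child ∧ p ∉ chosen)))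
    (hsec : ∀ p ∈ rem, sec.getD p 0 = (chosen.map (fun q => jA.getD (pvPairKey p q) 0)).sum) :
    pvA_select nodes cfreq jA child n chosen = pvB_select edge joint child n rem sec chosen := by
  induction n generalizing chosen sec rem with
  | zero => rfl
  | succ n ih =>
    subst hrem
    cases hc : nodes.filter (fun p => decide (p ≠ child ∧ p ∉ chosen)) with
    | nil => rw [pvA_select, pvB_select, hc]
    | cons h0 t =>
      have hFnodup : (h0 :: t).Nodup := hc ▸ List.Nodup.filter _ hnd
      have hkey : ∀ x ∈ h0 :: t,
          pvA_key cfreq jA chosen x = pvB_key edge sec child x := by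
        intro x hx
        unfold pvA_key pvB_key
        rw [hedge x, hsec x (hc ▸ hx)]
      have hb : (t.foldl (fun best x =>
            if pvKeyGt (pvA_key cfreq jA chosen x) (pvA_key cfreq jA chosen best)
            then x else best) h0)
          = (t.foldl (fun b x =>
            if pvKeyGt (pvB_key edge sec child x) (pvB_key edge sec child b) then x else b) h0) :=
        pv_pick_congr _ _ (h0 :: t) t h0 List.mem_cons_self
          (fun x hx => List.mem_cons_of_mem _ hx) hkey
      set b := t.foldl (fun best x =>
        if pvKeyGt (pvA_key cfreq jA chosen x) (pvA_key cfreq jA chosen best)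
        then x else best) h0 with hbdef
      have hbmem : b ∈ h0 :: t := by
        rcases pv_pick_mem (pvA_key cfreq jA chosen) t h0 with h | h
        · exact h ▸ List.mem_cons_self
        · exact List.mem_cons_of_mem _ h
      rw [pvA_select, pvB_select, hc, ← hb,
        PySem.List.remove?_eq_some_erase _ b hbmem, Option.getD_some]
      have herase : (h0 :: t).erase b
          = nodes.filter (fun p => decide (p ≠ child ∧ p ∉ chosen ++ [b])) := by
        rw [List.Nodup.erase_eq_filter hFnodup, ← hc, List.filter_filter]
        apply List.filter_congr
        intro x _
        by_cases h1 : x = b <;> by_cases h2 : x = child <;> by_cases h3 : x ∈ chosen <;>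
          simp [h1, h2, h3]
      apply ih
      · exact herase
      · intro p hp
        rw [pv_sec_fold_getD _ (List.Nodup.erase _ hFnodup) _ _ p, if_pos hp,
          hsec p (hc ▸ List.mem_of_mem_erase hp), ← hbdef]
        simp [hjoint]

-- ===== VERDICT (by name: the statement is the Claim_ definition above) =====
theorem most_likely_parents_spec : Claim_equal_most_likely_parents := by
  intro sampled_dags K _ _
  unfold Spec_most_likely_parents
  simp only [most_likely_parents, most_likely_parents_alt]
  rw [← pv_nodes_eq]
  apply PySem.List.foldl_congr_mem'
  intro child hchild acc
  have hnd : (PySem.List.sorted (pvA_gather sampled_dags) (fun x => x)).Nodup :=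
    (PySem.List.sorted_perm _ _ _).symm.nodup (pv_nodup_gather sampled_dags)
  have hrem : (PySem.List.sorted (pvA_gather sampled_dags) (fun x => x)).filter
        (fun p => decide (p ≠ child))
      = (PySem.List.sorted (pvA_gather sampled_dags) (fun x => x)).filter
        (fun p => decide (p ≠ child ∧ p ∉ ([] : List Int))) := by
    apply List.filter_congr
    intro x _
    simp
  rw [pv_select_eq _ hnd _ _ _ _ child
    (fun p => by rw [pv_zfill_getD, pv_edge_eq])
    (fun k => pv_joint_eq sampled_dags child k)
    K.toNat [] PySem.Dict.empty _ hrem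
    (fun p _ => by simp [PySem.Dict.getD_empty])]
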